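-- pv_equiv track=rewrite | github.com/really-that-lazy/cs116 | assignments/6/a06q2.py | build_special_list
-- ===== SOURCE A (Python) =====
-- def build_special_list(n):
-- 	containerList = []
-- 	for i in range(1, n+1):
-- 		subList = []
-- 		for k in range(1, i+1):
-- 			subList += [k]
-- 		containerList += [subList]
--
--     ##return [[k for k in range(1, i+1)] for i in range(1, n+1)]
-- 	return containerList
-- ===== SOURCE B (Python) =====
-- def build_special_list(n):
--     containerList = []
--     current = []
--     for i in range(1, n + 1):
--         current = current + [i]
--         containerList.append(current)
--     return containerList
-- ===== Notes on version B (the rewrite author's own statement) =====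
-- stated objective: faster
-- what changed: B keeps one running prefix list and extends it by a single element per step, instead of A's nested loop that rebuilds each sublist [1..i] element by element from scratch.
import Mathlib
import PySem

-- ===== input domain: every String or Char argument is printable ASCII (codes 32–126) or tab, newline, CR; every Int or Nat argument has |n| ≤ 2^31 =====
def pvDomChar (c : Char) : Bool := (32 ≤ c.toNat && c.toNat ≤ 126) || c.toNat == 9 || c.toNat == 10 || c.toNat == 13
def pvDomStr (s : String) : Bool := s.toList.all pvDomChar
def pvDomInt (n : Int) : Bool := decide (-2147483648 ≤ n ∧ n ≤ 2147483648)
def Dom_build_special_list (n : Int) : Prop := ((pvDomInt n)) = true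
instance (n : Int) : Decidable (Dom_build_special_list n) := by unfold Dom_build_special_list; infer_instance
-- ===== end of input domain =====

-- B replaces A's nested rebuild of each sublist [1..i] by one running prefix extended per step (faster).

-- ===== PORT A =====
def build_special_list (n : Int) : List (List Int) :=
  (PySem.List.pyRange 1 (n + 1) 1).foldl
    (fun containerList i =>
      containerList ++ [(PySem.List.pyRange 1 (i + 1) 1).foldl (fun subList k => subList ++ [k]) []])
    []

-- ===== PORT B =====
def build_special_list_alt (n : Int) : List (List Int) :=
  ((PySem.List.pyRange 1 (n + 1) 1).foldl
    (fun (st : List Int × List (List Int)) i =>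
      let current := st.1 ++ [i]
      (current, st.2 ++ [current]))
    ([], [])).2

-- ===== PRECONDITION & SPEC =====
def Spec_build_special_list (n : Int) (out : List (List Int)) : Prop := out = build_special_list_alt n
instance (n : Int) (out : List (List Int)) : Decidable (Spec_build_special_list n out) := by unfold Spec_build_special_list; infer_instance

-- ===== CLAIM (what is proved, stated in full; the proofs are below) =====
def Claim_equal_build_special_list : Prop := ∀ (n : Int), Dom_build_special_list n → Spec_build_special_list n (build_special_list n)

-- ===== LEMMAS AND PROOFS =====

-- foldl that appends one mapped element per step is append of the map
theorem pv_foldl_map_singleton {α β : Type} (f : α → β) :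
    ∀ (xs : List α) (acc : List β),
      xs.foldl (fun c i => c ++ [f i]) acc = acc ++ xs.map f := by
  intro xs
  induction xs with
  | nil => intro acc; simp
  | cons x xs ih => intro acc; simp [List.foldl, ih]

-- B's loop invariant: starting from the prefix [1..a), it emits exactly the rows [1..i] for i in [a, a+m)
theorem pv_foldB (m : Nat) :
    ∀ (a : Int) (res : List (List Int)), 1 ≤ a →
      ((PySem.List.pyRange a (a + m) 1).foldl
        (fun (st : List Int × List (List Int)) i =>
          (st.1 ++ [i], st.2 ++ [st.1 ++ [i]]))
        (PySem.List.pyRange 1 a 1, res)).2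
      = res ++ (PySem.List.pyRange a (a + m) 1).map (fun i => PySem.List.pyRange 1 (i + 1) 1) := by
  induction m with
  | zero => intro a res _; simp [PySem.List.pyRange_one_eq_nil]
  | succ m ih =>
    intro a res ha
    rw [PySem.List.pyRange_one_cons (by push_cast; omega : a < a + ((m : Nat) + 1 : Nat))]
    simp only [List.foldl_cons, List.map_cons]
    have h1 : a + ((m : Nat) + 1 : Nat) = (a + 1) + (m : Nat) := by push_cast; omega
    rw [h1, ← PySem.List.pyRange_one_succ_right ha,
       ih (a + 1) (res ++ [PySem.List.pyRange 1 (a + 1) 1]) (by omega)]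
    simp

-- ===== VERDICT (by name: the statement is the Claim_ definition above) =====
theorem build_special_list_spec : Claim_equal_build_special_list := by
  intro n _
  unfold Spec_build_special_list build_special_list build_special_list_alt
  by_cases hn : n ≤ 0
  · rw [PySem.List.pyRange_one_eq_nil (by omega)]
    simp
  · have hm : n + 1 = 1 + (n.toNat : Int) := by omega
    rw [hm]
    have hB := pv_foldB n.toNat 1 [] le_rfl
    rw [PySem.List.pyRange_one_eq_nil (le_refl 1)] at hB
    simp only [hB, List.nil_append]
    rw [pv_foldl_map_singleton]
    simp only [List.nil_append]
    congr 1
    funext i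
    exact (pv_foldl_map_singleton (fun k => k) (PySem.List.pyRange 1 (i + 1) 1) []).trans (by simp)
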